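-- pv_equiv track=rewrite | github.com/osama-khalid/CommunityLanguage | tokenUpdate.py | hasElongation
-- ===== SOURCE A (Python) =====
-- def hasElongation(text):
--     '''
--     returns True if word has a letter with 3 or more repetitions
--     e.g. helllo
--     False otherwise
--     '''
--     text=text+" "
--     c=1
--     maxC=1
--     for i in range(1,len(text)):
--         if text[i]==text[i-1]:
--             c=c+1
--         else:
--             if c>maxC:
--                 maxC=c
--             c=1
--     if maxC>=3:
--         return(True)
--     else:
--
--         return(False)
-- ===== SOURCE B (Python) =====
-- def hasElongation(text):
--     t = text.rstrip(' ')
--     return any(a == b == c for a, b, c in zip(t, t[1:], t[2:]))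
-- ===== Notes on version B (the rewrite author's own statement) =====
-- stated objective: idiomatic
-- what changed: B drops A's appended sentinel space and run-length counter/maximum loop: it strips trailing spaces (which play the role of A's never-flushed final run) and checks with any() over three shifted views whether three consecutive equal characters exist.
import Mathlib
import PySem

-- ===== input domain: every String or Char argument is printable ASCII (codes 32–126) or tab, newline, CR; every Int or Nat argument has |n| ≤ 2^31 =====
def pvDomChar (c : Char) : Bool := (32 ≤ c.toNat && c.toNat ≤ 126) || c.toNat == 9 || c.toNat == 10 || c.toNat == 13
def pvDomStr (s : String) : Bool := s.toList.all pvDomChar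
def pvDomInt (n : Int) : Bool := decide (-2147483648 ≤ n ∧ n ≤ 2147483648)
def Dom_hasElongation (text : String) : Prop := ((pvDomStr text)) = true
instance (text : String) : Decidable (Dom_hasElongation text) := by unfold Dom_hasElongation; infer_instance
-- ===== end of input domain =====

-- B replaces A's run-length counter loop by stripping trailing spaces and checking
-- any three consecutive equal characters (zip of three shifted views); objective: idiomatic.

-- ===== PORT A =====
-- text = text + " "; c = 1; maxC = 1; for i in range(1, len(text)): …; return maxC >= 3
def hasElongation (text : String) : Bool :=
  let s : List Char := text.toList ++ [' ']
  let r :=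
    (PySem.List.pyRange 1 (s.length : Int) 1).foldl
      (fun (st : Int × Int) i =>
        if PySem.List.pyGetD s i ' ' == PySem.List.pyGetD s (i - 1) ' ' then
          (st.1 + 1, st.2)
        else
          (1, if st.1 > st.2 then st.1 else st.2))
      (1, 1)
  decide (3 ≤ r.2)

-- ===== PORT B =====
-- t = text.rstrip(' ')  (hand port, exact: drop trailing ' ' characters only)
def pyRstripSpace (l : List Char) : List Char := (l.reverse.dropWhile (· == ' ')).reverse

-- any(a == b == c for a, b, c in zip(t, t[1:], t[2:]))
def hasElongation_alt (text : String) : Bool :=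
  let t := pyRstripSpace text.toList
  ((t.zip (t.drop 1)).zip (t.drop 2)).any (fun x => x.1.1 == x.1.2 && x.1.2 == x.2)

-- ===== PRECONDITION & SPEC =====
def Spec_hasElongation (text : String) (out : Bool) : Prop := out = hasElongation_alt text
instance (text : String) (out : Bool) : Decidable (Spec_hasElongation text out) := by unfold Spec_hasElongation; infer_instance

-- ===== CLAIM (what is proved, stated in full; the proofs are below) =====
def Claim_equal_hasElongation : Prop := ∀ (text : String), Dom_hasElongation text → Spec_hasElongation text (hasElongation text)

-- ===== LEMMAS AND PROOFS =====

-- A's loop, structurally: prev char, rest, run counter c, running max m; returns final maxC.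
def runA : Char → List Char → Int → Int → Int
  | _, [], _, m => m
  | p, x :: xs, c, m =>
    if x = p then runA x xs (c + 1) m else runA x xs 1 (if c > m then c else m)

-- "some flushed run has length ≥ 3" (the final run is never flushed).
def flush3 : Char → List Char → Int → Bool
  | _, [], _ => false
  | p, x :: xs, c =>
    if x = p then flush3 x xs (c + 1) else (decide (3 ≤ c) || flush3 x xs 1)

-- three consecutive equal characters, structurally
def hasTriple : List Char → Bool
  | a :: b :: c :: r => (a == b && b == c) || hasTriple (b :: c :: r)
  | _ => false

-- remove the last maximal run of equal characters
def dropLastRun (t : List Char) : List Char :=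
  match t.reverse with
  | [] => []
  | a :: r => (r.dropWhile (· == a)).reverse

theorem rangeFold {σ : Type} (l : List Char) (f : σ → Char → Char → σ) (init : σ) :
    (List.range (l.length - 1)).foldl
        (fun acc k => f acc (l.getD k ' ') (l.getD (k + 1) ' ')) init
      = (l.zip (l.drop 1)).foldl (fun acc p => f acc p.1 p.2) init := by
  induction l generalizing init with
  | nil => simp
  | cons x xs ih =>
    cases xs with
    | nil => simp
    | cons y ys =>
      rw [show (x :: y :: ys : List Char).length - 1
            = ((y :: ys : List Char).length - 1) + 1 by simp]
      rw [List.range_succ_eq_map, List.foldl_cons, List.foldl_map]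
      simp only [List.getD_cons_zero, List.getD_cons_succ]
      have ih' := ih (f init x y)
      simp only [List.getD_cons_succ] at ih'
      rw [ih']
      simp

theorem foldIdx {σ : Type} (l : List Char) (f : σ → Char → Char → σ) (init : σ) :
    (PySem.List.pyRange 1 (l.length : Int) 1).foldl
        (fun acc i => f acc (PySem.List.pyGetD l (i - 1) ' ') (PySem.List.pyGetD l i ' ')) init
      = (l.zip (l.drop 1)).foldl (fun acc p => f acc p.1 p.2) init := by
  rw [PySem.List.pyRange_one, List.foldl_map]
  have h1 : ((l.length : Int) - 1).toNat = l.length - 1 := by omega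
  rw [h1, ← rangeFold l f init]
  apply PySem.List.foldl_congr_mem
  intro acc k hk
  have hk' : k < l.length - 1 := List.mem_range.mp hk
  have e1 : (1 : Int) + (k : Int) - 1 = ((k : Nat) : Int) := by ring
  have e2 : (1 : Int) + (k : Int) = (((k + 1 : Nat)) : Int) := by push_cast; ring
  rw [e1, e2, PySem.List.pyGetD_natCast, PySem.List.pyGetD_natCast]

theorem zipFoldRunA (l : List Char) (p : Char) (c m : Int) :
    (((p :: l).zip l).foldl
        (fun (st : Int × Int) q =>
          if q.2 == q.1 then (st.1 + 1, st.2)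
          else (1, if st.1 > st.2 then st.1 else st.2))
        (c, m)).2 = runA p l c m := by
  induction l generalizing p c m with
  | nil => simp [runA]
  | cons x xs ih =>
    simp only [List.zip_cons_cons, List.foldl_cons, runA]
    by_cases h : x = p
    · simp only [h, beq_self_eq_true, if_true]
      exact ih p (c + 1) m
    · have hb : (x == p) = false := by simp [h]
      simp only [hb, if_neg h, Bool.false_eq_true, if_false]
      exact ih x 1 (if c > m then c else m)

theorem runA_ge3 (l : List Char) (p : Char) (c m : Int) :
    decide (3 ≤ runA p l c m) = (decide (3 ≤ m) || flush3 p l c) := by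
  induction l generalizing p c m with
  | nil => simp [runA, flush3]
  | cons x xs ih =>
    simp only [runA, flush3]
    by_cases h : x = p
    · simp only [if_pos h]
      exact ih x (c + 1) m
    · simp only [if_neg h]
      rw [ih]
      have h3 : decide (3 ≤ (if c > m then c else m)) = (decide (3 ≤ m) || decide (3 ≤ c)) := by
        by_cases hm : 3 ≤ m <;> by_cases hc : 3 ≤ c <;> split_ifs <;> simp_all <;> omega
      rw [h3, Bool.or_assoc]

theorem hasTriple_cons_of_head_ne (p : Char) (C : List Char) (h : C.head? ≠ some p) :
    hasTriple (p :: C) = hasTriple C := by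
  match C with
  | [] => rfl
  | [a] => rfl
  | a :: b :: r =>
    have ha : a ≠ p := by simpa using h
    have hpa : (p == a) = false := by
      rw [beq_eq_false_iff_ne]; exact fun he => ha he.symm
    simp [hasTriple, hpa]

theorem hasTriple_replicate_append (c : Nat) (p : Char) (C : List Char)
    (h : C.head? ≠ some p) :
    hasTriple (List.replicate c p ++ C) = (decide (3 ≤ c) || hasTriple C) := by
  match c with
  | 0 => simp
  | 1 =>
    rw [List.replicate_one, List.singleton_append, hasTriple_cons_of_head_ne p C h]
    simp
  | 2 =>
    have h22 : List.replicate 2 p ++ C = p :: p :: C := by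
      simp [List.replicate_succ]
    rw [h22]
    match C with
    | [] => rfl
    | a :: r =>
      have ha : a ≠ p := by simpa using h
      have hpa : (p == a) = false := by
        rw [beq_eq_false_iff_ne]; exact fun he => ha he.symm
      have h2 : hasTriple (p :: a :: r) = hasTriple (a :: r) :=
        hasTriple_cons_of_head_ne p (a :: r) h
      simp [hasTriple, hpa, h2]
  | (n + 3) =>
    have h33 : List.replicate (n + 3) p ++ C = p :: p :: p :: (List.replicate n p ++ C) := by
      simp [List.replicate_succ]
    rw [h33]
    simp [hasTriple]

theorem dropLastRun_eq (t : List Char) (a : Char) (r : List Char) (h : t.reverse = a :: r) :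
    dropLastRun t = (r.dropWhile (· == a)).reverse := by
  unfold dropLastRun
  rw [h]

theorem dropLastRun_replicate (c : Nat) (p : Char) (hc : 1 ≤ c) :
    dropLastRun (List.replicate c p) = [] := by
  obtain ⟨c', rfl⟩ : ∃ c', c = c' + 1 := ⟨c - 1, by omega⟩
  rw [dropLastRun_eq (List.replicate (c' + 1) p) p (List.replicate c' p)
        (by rw [List.reverse_replicate, List.replicate_succ])]
  simp

theorem dropLastRun_append (c : Nat) (p x : Char) (xs : List Char) (hxp : x ≠ p) :
    dropLastRun (List.replicate c p ++ x :: xs)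
      = List.replicate c p ++ dropLastRun (x :: xs) := by
  obtain ⟨b0, rb', hB⟩ : ∃ b0 rb', (x :: xs).reverse = b0 :: rb' := by
    cases h : (x :: xs).reverse with
    | nil =>
      have hlen := congrArg List.length h
      simp at hlen
    | cons a r => exact ⟨a, r, rfl⟩
  rw [dropLastRun_eq (List.replicate c p ++ x :: xs) b0 (rb' ++ List.replicate c p)
        (by rw [List.reverse_append, List.reverse_replicate, hB]; rfl)]
  rw [dropLastRun_eq (x :: xs) b0 rb' hB]
  rw [List.dropWhile_append]
  by_cases hemp : (rb'.dropWhile (· == b0)).isEmpty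
  · -- rb' is all b0; then x :: xs is all b0, so b0 = x ≠ p
    have hall : ∀ y ∈ rb', (y == b0) = true := by
      rw [List.isEmpty_iff] at hemp
      exact List.dropWhile_eq_nil_iff.mp hemp
    have hxb : x = b0 := by
      have hx : x ∈ (x :: xs).reverse := by simp
      rw [hB] at hx
      rcases List.mem_cons.mp hx with h | h
      · exact h
      · exact beq_iff_eq.mp (hall x h)
    have hpb : ¬ ((fun y => y == b0) p = true) := by
      simp only [beq_iff_eq]
      intro he; exact hxp (by rw [hxb, he])
    have hdw : (List.replicate c p).dropWhile (· == b0) = List.replicate c p := by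
      cases c with
      | zero => rfl
      | succ n =>
        rw [List.replicate_succ]
        exact List.dropWhile_cons_of_neg hpb
    rw [if_pos hemp]
    simp only [List.isEmpty_iff] at hemp
    rw [hdw, hemp]
    simp
  · rw [if_neg (by simpa using hemp)]
    simp

theorem dropLastRun_cons_prefix (x : Char) (xs : List Char) :
    dropLastRun (x :: xs) = [] ∨ ∃ ys, dropLastRun (x :: xs) = x :: ys := by
  obtain ⟨b0, rb', hB⟩ : ∃ b0 rb', (x :: xs).reverse = b0 :: rb' := by
    cases h : (x :: xs).reverse with
    | nil =>
      have hlen := congrArg List.length h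
      simp at hlen
    | cons a r => exact ⟨a, r, rfl⟩
  have hsfx : (rb'.dropWhile (· == b0)) <:+ b0 :: rb' :=
    (List.dropWhile_suffix _).trans (List.suffix_cons b0 rb')
  have hpre : (rb'.dropWhile (· == b0)).reverse <+: x :: xs := by
    have h2 := List.reverse_prefix.mpr hsfx
    rwa [← hB, List.reverse_reverse] at h2
  rw [dropLastRun_eq (x :: xs) b0 rb' hB]
  obtain ⟨t, ht⟩ := hpre
  cases hres : (rb'.dropWhile (· == b0)).reverse with
  | nil => left; rfl
  | cons a as =>
    right
    rw [hres] at ht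
    have hax : a = x := by
      have := congrArg (·.head?) ht
      simpa using this
    exact ⟨as, by rw [hax]⟩

theorem flush3_eq (xs : List Char) (p : Char) (c : Nat) (hc : 1 ≤ c) :
    flush3 p xs (c : Int) = hasTriple (dropLastRun (List.replicate c p ++ xs)) := by
  induction xs generalizing p c with
  | nil =>
    rw [List.append_nil, dropLastRun_replicate c p hc]
    rfl
  | cons x xs ih =>
    by_cases h : x = p
    · subst h
      have hlist : List.replicate c x ++ x :: xs = List.replicate (c + 1) x ++ xs := by
        rw [List.replicate_succ' (n := c)]
        simp
      rw [hlist, ← ih x (c + 1) (by omega)]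
      have hstep : flush3 x (x :: xs) (c : Int) = flush3 x xs ((c : Int) + 1) := by
        simp [flush3]
      rw [hstep]
      have hcast : ((c : Int) + 1) = (((c + 1 : Nat)) : Int) := by push_cast; ring
      rw [hcast]
    · have hx : x ≠ p := h
      have hstep : flush3 p (x :: xs) (c : Int)
          = (decide (3 ≤ (c : Int)) || flush3 x xs 1) := by
        simp [flush3, h]
      rw [hstep]
      rw [dropLastRun_append c p x xs hx]
      have hhead : (dropLastRun (x :: xs)).head? ≠ some p := by
        rcases dropLastRun_cons_prefix x xs with hn | ⟨ys, hy⟩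
        · rw [hn]; simp
        · rw [hy]; simpa using hx
      rw [hasTriple_replicate_append c p _ hhead]
      have hih := ih x 1 (le_refl 1)
      simp only [List.replicate_one, List.singleton_append, Nat.cast_one] at hih
      rw [← hih]
      congr 1
      simp

theorem zip3_any_eq_hasTriple : (t : List Char) →
    ((t.zip (t.drop 1)).zip (t.drop 2)).any (fun x => x.1.1 == x.1.2 && x.1.2 == x.2)
      = hasTriple t
  | [] => rfl
  | [_] => rfl
  | [_, _] => rfl
  | a :: b :: c :: r => by
    have ih := zip3_any_eq_hasTriple (b :: c :: r)
    simp only [List.drop_succ_cons, List.drop_zero, List.zip_cons_cons, List.any_cons] at *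
    rw [hasTriple, ← ih]

theorem pyRstrip_eq_dropLastRun (l : List Char) :
    pyRstripSpace l = dropLastRun (l ++ [' ']) := by
  unfold pyRstripSpace dropLastRun
  rw [List.reverse_append]
  simp

-- ===== VERDICT (by name: the statement is the Claim_ definition above) =====
theorem hasElongation_spec : Claim_equal_hasElongation := by
  intro text _
  unfold Spec_hasElongation hasElongation hasElongation_alt
  dsimp only
  rw [zip3_any_eq_hasTriple, pyRstrip_eq_dropLastRun]
  rw [foldIdx (text.toList ++ [' ']) (fun (st : Int × Int) a b =>
        if b == a then (st.1 + 1, st.2) else (1, if st.1 > st.2 then st.1 else st.2)) (1, 1)]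
  generalize text.toList = l
  cases l with
  | nil => decide
  | cons a l' =>
    simp only [List.cons_append]
    simp only [List.drop_succ_cons, List.drop_zero]
    simp only [zipFoldRunA (l' ++ [' ']) a 1 1, runA_ge3]
    have h31 : decide ((3 : Int) ≤ 1) = false := by decide
    rw [h31, Bool.false_or]
    have hf := flush3_eq (l' ++ [' ']) a 1 (le_refl 1)
    simp only [Nat.cast_one, List.replicate_one, List.singleton_append] at hf
    rw [hf]
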